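-- pv_equiv track=rewrite | github.com/wolf-collab/Laporan-Praktikum-Alpro-Grup-A | 71241150_Kevin S_Week 15_Rekursif.py | hitung
-- ===== SOURCE A (Python) =====
-- def hitung(n):
--     if type(n) is not int or n < 1:
--         return "Masukkan bilangan bulat positif aja ya"
--     if n < 10:
--         return str(n)
--     else:
--         angka_akhir = n % 10
--         sisa = n //10
--         return str(angka_akhir) + "+" + hitung(sisa)
-- ===== SOURCE B (Python) =====
-- def hitung(n):
--     if type(n) is not int or n < 1:
--         return "Masukkan bilangan bulat positif aja ya"
--     digits = []
--     while n > 0: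
--         digits.append(str(n % 10))
--         n //= 10
--     return "+".join(digits)
-- ===== Notes on version B (the rewrite author's own statement) =====
-- stated objective: idiomatic
-- what changed: Replaced A's recursion (which builds the string by repeated concatenation) with an iterative while-loop that collects the digit strings in a list and joins them once with '+'.join.
import Mathlib
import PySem

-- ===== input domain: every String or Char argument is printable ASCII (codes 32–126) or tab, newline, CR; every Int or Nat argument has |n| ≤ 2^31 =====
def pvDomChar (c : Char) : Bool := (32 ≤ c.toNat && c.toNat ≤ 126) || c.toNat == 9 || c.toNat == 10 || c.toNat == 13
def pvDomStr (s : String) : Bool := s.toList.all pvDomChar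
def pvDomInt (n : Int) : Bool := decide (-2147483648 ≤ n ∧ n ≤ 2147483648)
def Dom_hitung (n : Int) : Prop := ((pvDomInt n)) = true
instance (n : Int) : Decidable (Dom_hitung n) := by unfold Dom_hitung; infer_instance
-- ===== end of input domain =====

-- B replaces A's recursion-with-concatenation by an iterative digit loop and one '+'.join; return value only, no side effects.

-- ===== PORT A =====
-- A's recursion: error guard, single-digit base case, otherwise last digit ++ "+" ++ recurse on n // 10.
def hitung (n : Int) : String :=
  if n < 1 then "Masukkan bilangan bulat positif aja ya"
  else if n < 10 then PySem.Int.toStr n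
  else
    PySem.Int.toStr (PySem.Int.mod n 10) ++ "+" ++ hitung (PySem.Int.floordiv n 10)
termination_by n.toNat
decreasing_by
  have := PySem.Int.floordiv_eq_ediv_of_pos (a := n) (b := 10) (by omega)
  rw [this]; omega

-- ===== PORT B =====
-- B's while loop: while n > 0: digits.append(str(n % 10)); n //= 10
def hitungLoop (n : Int) (digits : List String) : List String :=
  if n > 0 then
    hitungLoop (PySem.Int.floordiv n 10) (digits ++ [PySem.Int.toStr (PySem.Int.mod n 10)])
  else digits
termination_by n.toNat
decreasing_by
  have := PySem.Int.floordiv_eq_ediv_of_pos (a := n) (b := 10) (by omega)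
  rw [this]; omega

def hitung_alt (n : Int) : String :=
  if n < 1 then "Masukkan bilangan bulat positif aja ya"
  else PySem.Str.join "+" (hitungLoop n [])

-- ===== PRECONDITION & SPEC =====
def Spec_hitung (n : Int) (out : String) : Prop := out = hitung_alt n
instance (n : Int) (out : String) : Decidable (Spec_hitung n out) := by unfold Spec_hitung; infer_instance

-- ===== CLAIM (what is proved, stated in full; the proofs are below) =====
def Claim_equal_hitung : Prop := ∀ (n : Int), Dom_hitung n → Spec_hitung n (hitung n)

-- ===== LEMMAS AND PROOFS =====

theorem hitungLoop_acc (n : Int) (digits : List String) :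
    hitungLoop n digits = digits ++ hitungLoop n [] := by
  by_cases h : n > 0
  · rw [show hitungLoop n digits
          = hitungLoop (PySem.Int.floordiv n 10) (digits ++ [PySem.Int.toStr (PySem.Int.mod n 10)]) from by
            rw [hitungLoop]; exact if_pos h,
        show hitungLoop n []
          = hitungLoop (PySem.Int.floordiv n 10) ([] ++ [PySem.Int.toStr (PySem.Int.mod n 10)]) from by
            rw [hitungLoop]; exact if_pos h]
    rw [hitungLoop_acc (PySem.Int.floordiv n 10) (digits ++ [_]),
        hitungLoop_acc (PySem.Int.floordiv n 10) ([] ++ [_])]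
    simp
  · rw [hitungLoop, if_neg h, hitungLoop, if_neg h]; simp
termination_by n.toNat
decreasing_by
  all_goals
    have := PySem.Int.floordiv_eq_ediv_of_pos (a := n) (b := 10) (by omega)
    rw [this]; omega

theorem hitungLoop_ne_nil (n : Int) (h : 1 ≤ n) : hitungLoop n [] ≠ [] := by
  rw [hitungLoop, if_pos (by omega), hitungLoop_acc]
  simp

theorem str_join_cons_cons (sep p q : String) (rest : List String) :
    PySem.Str.join sep (p :: q :: rest) = p ++ sep ++ PySem.Str.join sep (q :: rest) := by
  apply String.toList_inj.mp
  simp [PySem.Str.toList_join, PySem.Chars.join_cons_cons]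

theorem str_join_singleton (sep p : String) : PySem.Str.join sep [p] = p := by
  apply String.toList_inj.mp
  simp [PySem.Str.toList_join, PySem.Chars.join_singleton]

theorem hitung_eq_join (n : Int) (h : 1 ≤ n) :
    hitung n = PySem.Str.join "+" (hitungLoop n []) := by
  by_cases h10 : n < 10
  · have hd : PySem.Int.floordiv n 10 = 0 := by
      rw [PySem.Int.floordiv_eq_ediv_of_pos (by omega)]; omega
    have hm : PySem.Int.mod n 10 = n := by
      rw [PySem.Int.mod_eq_emod_of_pos (by omega)]; omega
    rw [hitung, if_neg (by omega), if_pos h10,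
        hitungLoop, if_pos (by omega), hd, hm,
        hitungLoop, if_neg (by omega)]
    simp [str_join_singleton]
  · have hdiv := PySem.Int.floordiv_eq_ediv_of_pos (a := n) (b := 10) (by omega)
    have hge : 1 ≤ PySem.Int.floordiv n 10 := by rw [hdiv]; omega
    have ih := hitung_eq_join (PySem.Int.floordiv n 10) hge
    rw [hitung, if_neg (by omega), if_neg h10, ih]
    rw [show hitungLoop n []
          = hitungLoop (PySem.Int.floordiv n 10) ([] ++ [PySem.Int.toStr (PySem.Int.mod n 10)]) from by
            rw [hitungLoop]; exact if_pos (by omega),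
        hitungLoop_acc (PySem.Int.floordiv n 10) ([] ++ [PySem.Int.toStr (PySem.Int.mod n 10)])]
    obtain ⟨q, rest, hqr⟩ := List.exists_cons_of_ne_nil (hitungLoop_ne_nil _ hge)
    rw [hqr]
    simp [str_join_cons_cons]
termination_by n.toNat
decreasing_by rw [hdiv]; omega

-- ===== VERDICT (by name: the statement is the Claim_ definition above) =====
theorem hitung_spec : Claim_equal_hitung := by
  intro n _
  unfold Spec_hitung hitung_alt
  by_cases h : n < 1
  · rw [hitung, if_pos h, if_pos h]
  · rw [if_neg h, hitung_eq_join n (by omega)]
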